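-- pv_equiv track=rewrite | github.com/Jimil-Joshi/Python-Programming-Practice | Assignment_9(2).py | range_num
-- ===== SOURCE A (Python) =====
-- def range_num (a):
--     rem = s = 0
--     length = len(str(a))
--     n = a
--     while(a>0):
--         rem =a%10
--         s += int(rem**length)
--         a = a//10
--         length = length - 1
--     return s
-- ===== SOURCE B (Python) =====
-- def range_num(a):
--     if a <= 0:
--         return 0
--     d = str(a)
--     return sum(int(ch) ** (i + 1) for i, ch in enumerate(d))
-- ===== Notes on version B (the rewrite author's own statement) =====
-- stated objective: idiomatic
-- what changed: Replaces the %10-and-//10 extraction loop with a decreasing length counter by a single comprehension over the decimal string read most-significant-first, so position i gets exponent i+1 directly.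
import Mathlib
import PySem

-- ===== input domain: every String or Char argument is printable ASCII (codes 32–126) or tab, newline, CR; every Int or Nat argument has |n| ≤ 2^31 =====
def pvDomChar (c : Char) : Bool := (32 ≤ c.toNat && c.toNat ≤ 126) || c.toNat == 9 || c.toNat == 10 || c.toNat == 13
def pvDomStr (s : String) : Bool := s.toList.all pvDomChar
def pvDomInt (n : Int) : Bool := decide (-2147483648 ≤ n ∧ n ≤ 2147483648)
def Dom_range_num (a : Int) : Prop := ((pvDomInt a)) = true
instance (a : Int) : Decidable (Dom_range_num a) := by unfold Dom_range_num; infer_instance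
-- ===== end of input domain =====

-- B replaces A's %10-and-//10 loop with a decreasing length counter by one comprehension
-- over the decimal string read most-significant-first (objective: idiomatic).

-- ===== PORT A =====
-- the while loop: state (a, length, s); `rem ** length` has length ≥ 1 whenever the loop
-- body runs from the entry point, so `length.toNat` as the exponent is exact there
def range_num_loop (a : Int) (length : Int) (s : Int) : Int :=
  if _h : a > 0 then
    range_num_loop (PySem.Int.floordiv a 10) (length - 1)
      (s + (PySem.Int.mod a 10) ^ length.toNat)
  else s
termination_by a.toNat
decreasing_by
  rw [PySem.Int.floordiv_eq_ediv_of_pos (by omega : (0:Int) < 10)]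
  omega

def range_num (a : Int) : Int :=
  range_num_loop a (PySem.Str.len (PySem.Int.toStr a)) 0

-- ===== PORT B =====
-- int(ch) ported as char code − 48: exact for the digit characters str(a) yields when a > 0
def range_num_alt (a : Int) : Int :=
  if a ≤ 0 then 0
  else
    ((PySem.List.enumerate (PySem.Int.toStr a).toList 0).map
      (fun p => ((p.2.toNat : Int) - 48) ^ (p.1 + 1).toNat)).sum

-- ===== PRECONDITION & SPEC =====
def Spec_range_num (a : Int) (out : Int) : Prop := out = range_num_alt a
instance (a : Int) (out : Int) : Decidable (Spec_range_num a out) := by unfold Spec_range_num; infer_instance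

-- ===== CLAIM (what is proved, stated in full; the proofs are below) =====
def Claim_equal_range_num : Prop := ∀ (a : Int), Dom_range_num a → Spec_range_num a (range_num a)

-- ===== LEMMAS AND PROOFS =====

-- little-endian digit list, head gets exponent e, exponents decrease (A's traversal)
def powA : List Nat → Nat → Int
  | [], _ => 0
  | d :: t, e => (d : Int) ^ e + powA t (e - 1)

-- big-endian digit list, head gets exponent e, exponents increase (B's traversal)
def powB : List Nat → Nat → Int
  | [], _ => 0
  | d :: t, e => (d : Int) ^ e + powB t (e + 1)

theorem toDigitsCore_eq (fuel : Nat) : ∀ (n : Nat), n < fuel → ∀ (ds : List Char),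
    Nat.toDigitsCore 10 fuel n ds =
      (if n = 0 then ['0'] else (Nat.digits 10 n).reverse.map Nat.digitChar) ++ ds := by
  induction fuel with
  | zero => intro n h; omega
  | succ fuel ih =>
    intro n h ds
    rw [Nat.toDigitsCore]
    by_cases h0 : n / 10 = 0
    · rw [if_pos h0]
      by_cases hn : n = 0
      · subst hn; simp; decide
      · have hlt : n < 10 := by omega
        rw [if_neg hn, Nat.digits_def' (by omega : 1 < 10) (by omega : 0 < n)]
        rw [h0]
        simp [Nat.mod_eq_of_lt hlt]
    · rw [if_neg h0]
      have hn : 0 < n := by by_contra hc; simp [Nat.eq_zero_of_not_pos hc] at h0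
      have hdiv : n / 10 < fuel := by
        have : n / 10 < n := Nat.div_lt_self hn (by omega)
        omega
      rw [ih (n / 10) hdiv]
      rw [if_neg h0]
      rw [Nat.digits_def' (by omega : 1 < 10) hn, if_neg (by omega : ¬ n = 0)]
      simp

theorem toChars_pos (a : Int) (ha : 0 < a) :
    PySem.Int.toChars a = (Nat.digits 10 a.toNat).reverse.map Nat.digitChar := by
  rw [PySem.Int.toChars]
  rw [if_neg (by omega)]
  rw [Nat.toDigits, toDigitsCore_eq (a.toNat + 1) a.toNat (by omega)]
  rw [if_neg (by omega)]
  simp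

theorem loop_eq (m : Nat) : ∀ (e : Nat) (s : Int), (Nat.digits 10 m).length ≤ e →
    range_num_loop (m : Int) (e : Int) s = s + powA (Nat.digits 10 m) e := by
  induction m using Nat.strong_induction_on with
  | _ m ih =>
    intro e s he
    by_cases hm : m = 0
    · subst hm
      rw [range_num_loop]
      simp [powA]
    · have hm' : 0 < m := Nat.pos_of_ne_zero hm
      rw [range_num_loop, dif_pos (by exact_mod_cast hm')]
      rw [Nat.digits_def' (by omega : 1 < 10) hm'] at he ⊢
      simp only [List.length_cons] at he
      have he1 : 1 ≤ e := by omega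
      have hfd : PySem.Int.floordiv (m : Int) 10 = ((m / 10 : Nat) : Int) :=
        PySem.Int.floordiv_natCast m 10
      have hmd : PySem.Int.mod (m : Int) 10 = ((m % 10 : Nat) : Int) :=
        PySem.Int.mod_natCast m 10
      have hcast : ((e : Int) - 1) = ((e - 1 : Nat) : Int) := by omega
      rw [hfd, hmd, hcast,
        ih (m / 10) (Nat.div_lt_self hm' (by omega)) (e - 1)
          (s + ((m % 10 : Nat) : Int) ^ (e : Int).toNat) (by omega)]
      simp only [powA, Int.toNat_natCast]
      ring

theorem powB_append (xs : List Nat) (d : Nat) : ∀ e : Nat,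
    powB (xs ++ [d]) e = powB xs e + (d : Int) ^ (e + xs.length) := by
  induction xs with
  | nil => intro e; simp [powB]
  | cons x t iht =>
    intro e
    simp only [List.cons_append, powB, iht (e + 1), List.length_cons]
    ring_nf

theorem powB_reverse (l : List Nat) : ∀ e : Nat,
    powB l.reverse (e + 1) = powA l (e + l.length) := by
  induction l with
  | nil => intro e; simp [powB, powA]
  | cons d t iht =>
    intro e
    simp only [List.reverse_cons, powB_append, iht, powA, List.length_cons,
      List.length_reverse]
    have h1 : e + 1 + t.length = e + (t.length + 1) := by omega
    have h2 : e + (t.length + 1) - 1 = e + t.length := by omega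
    rw [h1, h2]
    ring

theorem digitChar_val (d : Nat) (hd : d < 10) : ((Nat.digitChar d).toNat : Int) - 48 = d := by
  interval_cases d <;> decide

theorem enum_sum (xs : List Nat) : ∀ (k : Nat), (∀ d ∈ xs, d < 10) →
    ((PySem.List.enumerate (xs.map Nat.digitChar) (k : Int)).map
      (fun p => ((p.2.toNat : Int) - 48) ^ (p.1 + 1).toNat)).sum = powB xs (k + 1) := by
  induction xs with
  | nil => intro k _; simp [PySem.List.enumerate_nil, powB]
  | cons d t iht =>
    intro k hall
    rw [List.map_cons, PySem.List.enumerate_cons, List.map_cons, List.sum_cons]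
    have hk1 : ((k : Int) + 1) = ((k + 1 : Nat) : Int) := by omega
    rw [hk1, iht (k + 1) (fun x hx => hall x (List.mem_cons_of_mem d hx))]
    simp only [powB, digitChar_val d (hall d (List.mem_cons_self)), Int.toNat_natCast]

-- ===== VERDICT (by name: the statement is the Claim_ definition above) =====
theorem range_num_spec : Claim_equal_range_num := by
  intro a _
  unfold Spec_range_num range_num range_num_alt
  by_cases ha : a ≤ 0
  · rw [if_pos ha, range_num_loop, dif_neg (by omega)]
  · have ha' : 0 < a := by omega
    rw [if_neg ha]
    have hlen : PySem.Str.len (PySem.Int.toStr a) =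
        ((Nat.digits 10 a.toNat).length : Int) := by
      rw [PySem.Str.len_eq, PySem.Int.toList_toStr, toChars_pos a ha']
      simp
    have hm : ((a.toNat : Nat) : Int) = a := Int.toNat_of_nonneg (by omega)
    rw [hlen, ← hm]
    simp only [Int.toNat_natCast]
    rw [loop_eq a.toNat (Nat.digits 10 a.toNat).length 0 (le_refl _),
      PySem.Int.toList_toStr, toChars_pos ((a.toNat : Nat) : Int) (by omega)]
    simp only [Int.toNat_natCast]
    have hsum := enum_sum (Nat.digits 10 a.toNat).reverse 0
        (fun d hd => Nat.digits_lt_base (by omega) (List.mem_reverse.mp hd))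
    simp only [Nat.cast_zero] at hsum
    rw [hsum, powB_reverse (Nat.digits 10 a.toNat) 0]
    simp
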